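-- pv_equiv track=rewrite | github.com/kingther94c/ML | randomized_optimization/utils.py | prod_consec_one
-- ===== SOURCE A (Python) =====
-- def prod_consec_one(state):
--     prod = 1
--     count = 0
--     for s in state:
--         if s == 0 and count > 0:
--             prod *= count
--             count = 0
--         elif s == 1:
--             count += 1
--     if count > 0:
--         prod *= count
--     return prod
-- ===== SOURCE B (Python) =====
-- def prod_consec_one(state):
--     # Group the sequence into maximal runs keyed by (s == 0), then multiply
--     # the count of 1s of each non-zero run (when positive) into the product.
--     prod = 1
--     i, n = 0, len(state)
--     while i < n:
--         z = (state[i] == 0)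
--         j = i
--         while j < n and (state[j] == 0) == z:
--             j += 1
--         if not z:
--             c = sum(1 for s in state[i:j] if s == 1)
--             if c > 0:
--                 prod *= c
--         i = j
--     return prod
-- ===== Notes on version B (the rewrite author's own statement) =====
-- stated objective: alternative
-- what changed: B partitions the list into maximal runs keyed by (s == 0) and multiplies the 1-count of each non-zero run into the product, instead of threading a single (prod, count) accumulator through one flat loop.
import Mathlib
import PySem

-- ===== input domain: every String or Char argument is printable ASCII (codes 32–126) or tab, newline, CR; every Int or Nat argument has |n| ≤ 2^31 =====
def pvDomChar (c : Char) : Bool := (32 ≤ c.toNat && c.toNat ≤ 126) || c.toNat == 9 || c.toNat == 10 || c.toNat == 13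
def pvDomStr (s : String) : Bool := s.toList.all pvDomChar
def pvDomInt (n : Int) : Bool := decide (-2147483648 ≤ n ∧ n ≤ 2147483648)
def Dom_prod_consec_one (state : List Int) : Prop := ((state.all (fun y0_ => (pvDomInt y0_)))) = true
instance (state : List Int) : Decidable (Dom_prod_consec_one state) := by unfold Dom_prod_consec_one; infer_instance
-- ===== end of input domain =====

-- B groups the list into maximal runs keyed by (s == 0) and multiplies the 1-count of each
-- non-zero run into the product (alternative decomposition; same cost as A).

-- ===== PORT A =====
-- A: one flat loop threading (prod, count); flush count on a 0, bump it on a 1.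
def prod_consec_one (state : List Int) : Int :=
  let pc := state.foldl (fun (pc : Int × Int) s =>
    if s = 0 ∧ pc.2 > 0 then (pc.1 * pc.2, 0)
    else if s = 1 then (pc.1, pc.2 + 1)
    else pc) (1, 0)
  if pc.2 > 0 then pc.1 * pc.2 else pc.1

-- ===== PORT B =====
-- B-side helper: split into maximal runs of elements sharing the key (s == 0)
-- (the inner `while j < n and (state[j] == 0) == z` loop of Source B).
def pvGroupsByZero : List Int → List (List Int)
  | [] => []
  | x :: xs =>
    (x :: xs.takeWhile (fun s => (s == 0) == (x == 0)))
      :: pvGroupsByZero (xs.dropWhile (fun s => (s == 0) == (x == 0)))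
  termination_by l => l.length
  decreasing_by
    simp only [List.length_cons]
    exact Nat.lt_succ_of_le (List.length_dropWhile_le _ _)

def prod_consec_one_alt (state : List Int) : Int :=
  (pvGroupsByZero state).foldl
    (fun prod g =>
      if (g.head?.getD 0) = 0 then prod
      else
        let c : Int := (g.countP (fun s => s == 1) : Nat)
        if c > 0 then prod * c else prod) 1

-- ===== PRECONDITION & SPEC =====
def Spec_prod_consec_one (state : List Int) (out : Int) : Prop := out = prod_consec_one_alt state
instance (state : List Int) (out : Int) : Decidable (Spec_prod_consec_one state out) := by unfold Spec_prod_consec_one; infer_instance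

-- ===== CLAIM (what is proved, stated in full; the proofs are below) =====
def Claim_equal_prod_consec_one : Prop := ∀ (state : List Int), Dom_prod_consec_one state → Spec_prod_consec_one state (prod_consec_one state)

-- ===== LEMMAS AND PROOFS =====

-- A's loop body and final flush, named for the proofs.
def pvStepA (pc : Int × Int) (s : Int) : Int × Int :=
  if s = 0 ∧ pc.2 > 0 then (pc.1 * pc.2, 0)
  else if s = 1 then (pc.1, pc.2 + 1)
  else pc

def pvFinish (pc : Int × Int) : Int := if pc.2 > 0 then pc.1 * pc.2 else pc.1

-- B's fold body, named for the proofs.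
def pvStepB (prod : Int) (g : List Int) : Int :=
  if (g.head?.getD 0) = 0 then prod
  else
    let c : Int := (g.countP (fun s => s == 1) : Nat)
    if c > 0 then prod * c else prod

-- Over a zero-free run, A's loop just adds the run's 1-count to `count`.
theorem pvFoldA_nonzero (g : List Int) (h : ∀ s ∈ g, ¬ s = 0) (p c : Int) :
    List.foldl pvStepA (p, c) g = (p, c + (g.countP (fun s => s == 1) : Nat)) := by
  induction g generalizing c with
  | nil => simp
  | cons s t ih =>
    have hs : ¬ s = 0 := h s (by simp)
    have ht : ∀ u ∈ t, ¬ u = 0 := fun u hu => h u (by simp [hu])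
    rw [List.foldl_cons]
    by_cases h1 : s = 1
    · have hstep : pvStepA (p, c) s = (p, c + 1) := by simp [pvStepA, h1]
      rw [hstep, ih ht]
      simp [h1]
      ring
    · have hstep : pvStepA (p, c) s = (p, c) := by simp [pvStepA, hs, h1]
      rw [hstep, ih ht]
      simp [h1]

-- Over a run of zeros with count = 0, A's loop does nothing.
theorem pvFoldA_zero (g : List Int) (h : ∀ s ∈ g, s = 0) (p : Int) :
    List.foldl pvStepA (p, 0) g = (p, 0) := by
  induction g with
  | nil => rfl
  | cons s t ih =>
    have hs : s = 0 := h s (by simp)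
    have ht : ∀ u ∈ t, u = 0 := fun u hu => h u (by simp [hu])
    simp only [List.foldl_cons, pvStepA, hs]
    norm_num
    exact ih ht

-- Main invariant: flushing A's loop run from (p, 0) equals B's group fold started at p.
theorem pvMain (l : List Int) : ∀ p : Int,
    pvFinish (List.foldl pvStepA (p, 0) l) = List.foldl pvStepB p (pvGroupsByZero l) := by
  induction l using pvGroupsByZero.induct with
  | case1 => intro p; simp [pvGroupsByZero, pvFinish]
  | case2 x xs ih =>
    intro p
    rw [pvGroupsByZero]
    set g := xs.takeWhile (fun s => (s == 0) == (x == 0)) with hg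
    set rest := xs.dropWhile (fun s => (s == 0) == (x == 0)) with hrest
    have hsplit : xs = g ++ rest := (List.takeWhile_append_dropWhile).symm
    by_cases hx : x = 0
    · -- zero-keyed run: all elements are 0, loop state and product unchanged
      have hgz : ∀ s ∈ g, s = 0 := by
        intro s hs
        have hp := List.mem_takeWhile_imp hs
        simpa [hx] using hp
      have hall : ∀ s ∈ x :: g, s = 0 := by
        intro s hs; rcases List.mem_cons.mp hs with h | h
        · simpa [h] using hx
        · exact hgz s h
      rw [hsplit]
      rw [show (x :: (g ++ rest)) = (x :: g) ++ rest by simp]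
      rw [List.foldl_append, pvFoldA_zero (x :: g) hall p, ih p, List.foldl_cons]
      simp [pvStepB, hx]
    · -- non-zero-keyed run
      have hgnz : ∀ s ∈ g, ¬ s = 0 := by
        intro s hs
        have hp := List.mem_takeWhile_imp hs
        simpa [hx] using hp
      have hallnz : ∀ s ∈ x :: g, ¬ s = 0 := by
        intro s hs; rcases List.mem_cons.mp hs with h | h
        · simpa [h] using hx
        · exact hgnz s h
      rw [hsplit]
      rw [show (x :: (g ++ rest)) = (x :: g) ++ rest by simp]
      rw [List.foldl_append, pvFoldA_nonzero (x :: g) hallnz p 0]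
      set c : Int := (((x :: g).countP (fun s => s == 1) : Nat) : Int) with hc
      have hc0 : 0 ≤ c := by positivity
      have hstepB : pvStepB p (x :: g) = (if c > 0 then p * c else p) := by
        simp [pvStepB, hx, hc]
      -- the head of rest (if any) is 0
      cases hr : rest with
      | nil =>
        simp only [List.foldl_nil, pvGroupsByZero, List.foldl_cons]
        simp [pvFinish, hstepB]
      | cons y rest' =>
        have hy : y = 0 := by
          have := List.head?_dropWhile_not (p := fun s => (s == 0) == (x == 0)) (l := xs)
          rw [← hrest, hr] at this
          simp only [List.head?_cons] at this
          simpa [hx] using this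
        -- first zero flushes the count: state becomes (stepB p group, 0)
        have hflush : pvStepA (p, 0 + c) y = ((if c > 0 then p * c else p), 0) := by
          by_cases hcpos : c > 0
          · simp [pvStepA, hy, hcpos]
          · have : c = 0 := le_antisymm (not_lt.mp hcpos) hc0
            simp [pvStepA, hy, this]
        have hskip : pvStepA ((if c > 0 then p * c else p), 0) y = ((if c > 0 then p * c else p), 0) := by
          simp [pvStepA, hy]
        calc pvFinish (List.foldl pvStepA (pvStepA (p, 0 + c) y) rest')
            = pvFinish (List.foldl pvStepA ((if c > 0 then p * c else p), 0) (y :: rest')) := by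
              rw [List.foldl_cons, hskip, hflush]
          _ = List.foldl pvStepB (if c > 0 then p * c else p) (pvGroupsByZero rest) := by
              rw [← hr]; exact ih _
          _ = List.foldl pvStepB (pvStepB p (x :: g)) (pvGroupsByZero rest) := by rw [hstepB]
          _ = List.foldl pvStepB p ((x :: g) :: pvGroupsByZero rest) := by rw [List.foldl_cons]
          _ = List.foldl pvStepB p ((x :: g) :: pvGroupsByZero (y :: rest')) := by rw [hr]

-- ===== VERDICT (by name: the statement is the Claim_ definition above) =====
theorem prod_consec_one_spec : Claim_equal_prod_consec_one := by
  intro state _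
  show prod_consec_one state = prod_consec_one_alt state
  have h1 : prod_consec_one state = pvFinish (List.foldl pvStepA (1, 0) state) := rfl
  have h2 : prod_consec_one_alt state = List.foldl pvStepB 1 (pvGroupsByZero state) := rfl
  rw [h1, h2, pvMain]
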